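-- pv_equiv track=rewrite | github.com/loopy-dev/algorithm-v2 | hackerrank/preparation-kit-1month/week2-8.py | check
-- ===== SOURCE A (Python) =====
-- def check(grid):
--     for j in range(len(grid[0])):
--         last_chr = ""
--
--         for i in range(len(grid)):
--             # return False if current chr is smaller than stored
--             if grid[i][j] < last_chr:
--                 return False
--
--             last_chr = grid[i][j]
--
--     return True
-- ===== SOURCE B (Python) =====
-- def check(grid):
--     return all(list(col) == sorted(col) for col in zip(*grid))
-- ===== Notes on version B (the rewrite author's own statement) =====
-- stated objective: idiomatic
-- what changed: Replaces the index-driven column-major scan with a last-char accumulator and early return by transposing the grid with zip(*grid) and testing each column against its sorted copy; Pre_ excludes the empty grid (A raises IndexError) and ragged grids whose first row is not the shortest (A raises IndexError or returns an early False depending on its scan order, which zip-truncation does not reproduce).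
-- outside the precondition, e.g. on check(['ab', 'aa', 'b']): A returns False, B returns True; on check(['ab', 'b']): A raises IndexError, B returns True; on check([]): A raises IndexError, B returns True
import Mathlib
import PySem

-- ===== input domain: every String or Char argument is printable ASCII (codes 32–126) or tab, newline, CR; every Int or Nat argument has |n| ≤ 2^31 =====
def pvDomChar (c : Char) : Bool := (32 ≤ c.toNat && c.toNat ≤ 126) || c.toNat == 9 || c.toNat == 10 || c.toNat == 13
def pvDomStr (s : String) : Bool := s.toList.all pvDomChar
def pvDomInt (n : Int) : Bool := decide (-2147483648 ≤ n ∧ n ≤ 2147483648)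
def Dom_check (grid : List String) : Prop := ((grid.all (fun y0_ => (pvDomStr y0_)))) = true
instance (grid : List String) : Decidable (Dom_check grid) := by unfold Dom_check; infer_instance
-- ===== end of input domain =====

-- B transposes the grid and compares each column with its sorted copy instead of A's
-- index-driven column-major scan with a running last character; objective: idiomatic.

-- ===== PORT A =====
-- inner loop 'for i in range(len(grid))', with last_chr as Option Char (none = "")
def checkInner (grid : List String) (j : Int) : List Int → Option Char → Bool
  | [], _ => true
  | i :: is, last =>
    -- grid[i][j]; both indices are in range under Pre_check (i ranges over the rows,
    -- j < len(grid[0]) ≤ len(grid[i])), so pyGetD's defaults are never used there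
    let c : Char := PySem.List.pyGetD (PySem.List.pyGetD grid i "").toList j ' '
    -- 'grid[i][j] < last_chr': with last_chr = "" the comparison is always False
    let bad : Bool := match last with
      | some l => decide (c < l)
      | none => false
    if bad then false else checkInner grid j is (some c)

-- outer loop 'for j in range(len(grid[0]))'; an inner False returns from the whole function
def checkOuter (grid : List String) : List Int → Bool
  | [] => true
  | j :: js =>
    if checkInner grid j (PySem.List.pyRange 0 (grid.length : Int) 1) none
    then checkOuter grid js else false

-- 'len(grid[0])': on the empty grid Python raises IndexError (excluded by Pre_check)
def check (grid : List String) : Bool :=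
  checkOuter grid (PySem.List.pyRange 0 (PySem.Str.len (PySem.List.pyGetD grid 0 "")) 1)

-- ===== PORT B =====
-- zip(*rows): transpose truncated to the shortest row (Python's zip)
def pyZip (rows : List (List Char)) : List (List Char) :=
  if rows.isEmpty || rows.any List.isEmpty then []
  else rows.map (fun r => r.headD ' ') :: pyZip (rows.map List.tail)
termination_by (rows.headD []).length
decreasing_by
  cases rows with
  | nil => simp_all
  | cons r rs =>
    cases r with
    | nil => simp_all
    | cons c cs => simp

-- all(list(col) == sorted(col) for col in zip(*grid))
def check_alt (grid : List String) : Bool :=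
  (pyZip (grid.map String.toList)).all
    (fun col => col == PySem.List.sorted col (fun x => x))

-- ===== PRECONDITION & SPEC =====
-- Pre_ excludes the empty grid, on which A raises IndexError, and ragged grids with a row
-- shorter than the first row: there A raises IndexError or returns an early False that
-- depends on its column-major scan order, which zip-truncation does not reproduce.
def Pre_check (grid : List String) : Prop :=
  grid ≠ [] ∧ ∀ r ∈ grid, (grid.headD "").toList.length ≤ r.toList.length
instance (grid : List String) : Decidable (Pre_check grid) := by unfold Pre_check; infer_instance

def pvWitness_check : List String := (["ab", "ba"])

def Spec_check (grid : List String) (out : Bool) : Prop := out = check_alt grid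
instance (grid : List String) (out : Bool) : Decidable (Spec_check grid out) := by unfold Spec_check; infer_instance

-- ===== CLAIM (what is proved, stated in full; the proofs are below) =====
def Claim_equal_check : Prop := ∀ (grid : List String), Dom_check grid → Pre_check grid → Spec_check grid (check grid)

-- ===== LEMMAS AND PROOFS =====

-- the chain the inner loop walks: true iff each character is ≥ the stored one
def pvChain : Option Char → List Char → Bool
  | _, [] => true
  | last, c :: cs =>
    let bad : Bool := match last with
      | some l => decide (c < l)
      | none => false
    if bad then false else pvChain (some c) cs

lemma checkInner_eq_pvChain (grid : List String) (j : Int) :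
    ∀ (is : List Int) (last : Option Char),
      checkInner grid j is last
        = pvChain last (is.map (fun i => PySem.List.pyGetD (PySem.List.pyGetD grid i "").toList j ' ')) := by
  intro is
  induction is with
  | nil => intro last; rfl
  | cons i is ih =>
    intro last
    simp only [checkInner, pvChain, List.map_cons, ih]

lemma checkOuter_eq_all (grid : List String) :
    ∀ (js : List Int),
      checkOuter grid js
        = js.all (fun j => checkInner grid j (PySem.List.pyRange 0 (grid.length : Int) 1) none) := by
  intro js
  induction js with
  | nil => rfl
  | cons j js ih =>
    simp only [checkOuter, List.all_cons, ih]
    by_cases h : checkInner grid j (PySem.List.pyRange 0 (grid.length : Int) 1) none = true <;>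
      simp [h]

lemma pvChain_some_iff (cs : List Char) : ∀ (l : Char),
    pvChain (some l) cs = true ↔ List.Pairwise (· ≤ ·) (l :: cs) := by
  induction cs with
  | nil => intro l; simp [pvChain]
  | cons c cs ih =>
    intro l
    by_cases hlt : c < l
    · rw [show pvChain (some l) (c :: cs) = false from by simp [pvChain, hlt]]
      simp only [Bool.false_eq_true, false_iff]
      intro h
      exact absurd ((List.pairwise_cons.mp h).1 c (by simp)) (not_le.mpr hlt)
    · have hle : l ≤ c := not_lt.mp hlt
      rw [show pvChain (some l) (c :: cs) = pvChain (some c) cs from by simp [pvChain, hlt]]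
      rw [ih c]
      constructor
      · intro h
        refine List.pairwise_cons.mpr ⟨?_, h⟩
        intro x hx
        rcases List.mem_cons.mp hx with rfl | hx
        · exact hle
        · exact le_trans hle ((List.pairwise_cons.mp h).1 x hx)
      · intro h
        exact (List.pairwise_cons.mp h).2

lemma pvChain_none_iff (cs : List Char) :
    pvChain none cs = true ↔ List.Pairwise (· ≤ ·) cs := by
  cases cs with
  | nil => simp [pvChain]
  | cons c cs => simpa [pvChain] using pvChain_some_iff cs c

lemma col_sorted_iff (c : List Char) :
    (c == PySem.List.sorted c (fun x => x)) = true ↔ List.Pairwise (· ≤ ·) c := by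
  rw [beq_iff_eq]
  constructor
  · intro h
    have hp := PySem.List.sorted_pairwise c (fun x => x)
    rw [← h] at hp
    simpa using hp
  · intro h
    exact (PySem.List.sorted_eq_self_of_pairwise c (fun x => x) (by simpa using h)).symm

lemma pvChain_eq_col_sorted (c : List Char) :
    pvChain none c = (c == PySem.List.sorted c (fun x => x)) := by
  by_cases h : List.Pairwise (· ≤ ·) c
  · rw [(pvChain_none_iff c).mpr h, (col_sorted_iff c).mpr h]
  · have h1 : pvChain none c ≠ true := fun hc => h ((pvChain_none_iff c).mp hc)
    have h2 : (c == PySem.List.sorted c (fun x => x)) ≠ true :=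
      fun hc => h ((col_sorted_iff c).mp hc)
    rw [Bool.eq_false_iff.mpr h1, Bool.eq_false_iff.mpr h2]

lemma tail_getD (r : List Char) (hr : r ≠ []) (k : Nat) (d : Char) :
    r.tail.getD k d = r.getD (k + 1) d := by
  cases r with
  | nil => exact absurd rfl hr
  | cons x xs => rfl

lemma pyZip_eq (w : Nat) : ∀ (rows : List (List Char)), rows ≠ [] →
    (∀ r ∈ rows, w ≤ r.length) → (∃ r ∈ rows, r.length = w) →
    pyZip rows = (List.range w).map (fun k => rows.map (fun r => r.getD k ' ')) := by
  induction w with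
  | zero =>
    intro rows hne _ hex
    rcases hex with ⟨r, hr, hlen⟩
    rw [pyZip]
    have : rows.any List.isEmpty = true := by
      refine List.any_eq_true.mpr ⟨r, hr, ?_⟩
      simpa [List.isEmpty_iff, List.length_eq_zero_iff] using hlen
    simp [this]
  | succ w ih =>
    intro rows hne hall hex
    have hnoempty : ∀ r ∈ rows, r ≠ [] := by
      intro r hr h0
      have := hall r hr
      simp [h0] at this
    rw [pyZip]
    have h1 : rows.isEmpty = false := by simpa [List.isEmpty_iff] using hne
    have h2 : rows.any List.isEmpty = false := by
      refine List.any_eq_false.mpr ?_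
      intro r hr
      simpa [List.isEmpty_iff] using hnoempty r hr
    rw [h1, h2]
    simp only [Bool.or_self, Bool.false_eq_true, if_false]
    have htne : rows.map List.tail ≠ [] := by simpa using hne
    have htall : ∀ r ∈ rows.map List.tail, w ≤ r.length := by
      intro t ht
      rcases List.mem_map.mp ht with ⟨r, hr, rfl⟩
      have h4 := hall r hr
      have h5 : r.tail.length = r.length - 1 := List.length_tail
      omega
    have htex : ∃ r ∈ rows.map List.tail, r.length = w := by
      rcases hex with ⟨r, hr, hlen⟩
      refine ⟨r.tail, List.mem_map.mpr ⟨r, hr, rfl⟩, ?_⟩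
      have h5 : r.tail.length = r.length - 1 := List.length_tail
      omega
    rw [ih (rows.map List.tail) htne htall htex]
    rw [List.range_succ_eq_map]
    simp only [List.map_cons, List.map_map]
    congr 1
    · exact List.map_congr_left (fun r hr => by
        cases r with
        | nil => exact absurd rfl (hnoempty _ hr)
        | cons x xs => rfl)
    · refine List.map_congr_left (fun k _ => ?_)
      refine List.map_congr_left (fun r hr => ?_)
      simp only [Function.comp_apply]
      exact tail_getD r (hnoempty r hr) k ' '

-- ===== VERDICT (by name: the statement is the Claim_ definition above) =====
theorem check_spec : Claim_equal_check := by
  intro grid _hdom hpre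
  unfold Spec_check
  rcases hpre with ⟨hne, hmin⟩
  cases grid with
  | nil => exact absurd rfl hne
  | cons s gs =>
    set grid := s :: gs with hgrid
    set w := s.toList.length with hw
    -- A side
    have hA : check grid
        = (List.range w).all
            (fun k => pvChain none (grid.map (fun r => r.toList.getD k ' '))) := by
      unfold check
      rw [PySem.List.pyGetD_zero_cons, PySem.Str.len_eq, PySem.List.pyRange_zero_nat]
      rw [checkOuter_eq_all, List.all_map]
      refine congrArg (List.all (List.range w)) (funext fun k => ?_)
      simp only [Function.comp_apply]
      rw [checkInner_eq_pvChain]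
      congr 1
      calc (PySem.List.pyRange 0 (grid.length : Int) 1).map
              (fun i => PySem.List.pyGetD (PySem.List.pyGetD grid i "").toList (k : Int) ' ')
          = ((PySem.List.pyRange 0 (grid.length : Int) 1).map
              (fun i => PySem.List.pyGetD grid i "")).map
              (fun r => PySem.List.pyGetD r.toList (k : Int) ' ') := by
            rw [List.map_map]; rfl
        _ = grid.map (fun r => PySem.List.pyGetD r.toList (k : Int) ' ') := by
            rw [PySem.List.map_pyGetD_pyRange_zero']
        _ = grid.map (fun r => r.toList.getD k ' ') := by
            simp [PySem.List.pyGetD_natCast]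
    -- B side
    have hB : check_alt grid
        = (List.range w).all
            (fun k => grid.map (fun r => r.toList.getD k ' ')
                        == PySem.List.sorted (grid.map (fun r => r.toList.getD k ' ')) (fun x => x)) := by
      show (pyZip (grid.map String.toList)).all
            (fun col => col == PySem.List.sorted col (fun x => x)) = _
      rw [pyZip_eq w (grid.map String.toList)
            (by simp [hgrid])
            (by intro r hr
                rcases List.mem_map.mp hr with ⟨t, ht, rfl⟩
                exact hmin t ht)
            (⟨s.toList, by simp [hgrid], rfl⟩)]
      rw [List.all_map]
      refine congrArg (List.all (List.range w)) (funext fun k => ?_)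
      simp only [Function.comp_apply]
      rw [List.map_map]
      rfl
    rw [hA, hB]
    exact congrArg (List.all (List.range w)) (funext fun k => pvChain_eq_col_sorted _)
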